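-- pv_equiv track=rewrite | github.com/Kowboits/RE | main.py | clear_dublacates
-- ===== SOURCE A (Python) =====
-- def clear_dublacates(contacts_list):
--   for i in contacts_list:
--     for j in contacts_list:
--       if i[0] == j[0] and i[1] == j[1] and i != j:
--         if i[2] == '':
--           i[2] = j[2]
--         if i[3] == '':
--           i[3] = j[3]
--         if i[4] == '':
--           i[4] = j[4]
--         if i[5] == '':
--           i[5] = j[5]
--         if i[6] == '':
--           i[6] = j[6]
--   updated_cl = []
--   for line in contacts_list:
--     if line not in updated_cl:
--       updated_cl.append(line)
--   return updated_cl
-- ===== SOURCE B (Python) =====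
-- def clear_dublacates(contacts_list):
--     # Group rows by (name, lastname), precompute the first non-empty value of each
--     # merge field per group, then build the output in one pass with a seen-set dedup.
--     groups = {}
--     for row in contacts_list:
--         groups.setdefault((row[0], row[1]), []).append(row)
--     fills = {}
--     for key, rows in groups.items():
--         if any(r != rows[0] for r in rows):
--             fills[key] = [next((r[k] for r in rows if r[k] != ''), '') for k in range(2, 7)]
--     seen = set()
--     result = []
--     for row in contacts_list:
--         f = fills.get((row[0], row[1]))
--         if f is None:
--             merged = list(row)
--         else:
--             merged = row[:2] + [row[k] if row[k] != '' else f[k - 2] for k in range(2, 7)] + row[7:]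
--         t = tuple(merged)
--         if t not in seen:
--             seen.add(t)
--             result.append(merged)
--     return result
-- ===== Notes on version B (the rewrite author's own statement) =====
-- stated objective: faster
-- what changed: Replaced A's O(n^2) in-place nested-loop field merging by a single-pass dict grouping keyed on (name, lastname) with per-group precomputed first-non-empty fill values, and replaced the quadratic 'line not in updated_cl' dedup by a seen-set; A mutates the input rows in place, B does not (the claim is about the return value).
import Mathlib
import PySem

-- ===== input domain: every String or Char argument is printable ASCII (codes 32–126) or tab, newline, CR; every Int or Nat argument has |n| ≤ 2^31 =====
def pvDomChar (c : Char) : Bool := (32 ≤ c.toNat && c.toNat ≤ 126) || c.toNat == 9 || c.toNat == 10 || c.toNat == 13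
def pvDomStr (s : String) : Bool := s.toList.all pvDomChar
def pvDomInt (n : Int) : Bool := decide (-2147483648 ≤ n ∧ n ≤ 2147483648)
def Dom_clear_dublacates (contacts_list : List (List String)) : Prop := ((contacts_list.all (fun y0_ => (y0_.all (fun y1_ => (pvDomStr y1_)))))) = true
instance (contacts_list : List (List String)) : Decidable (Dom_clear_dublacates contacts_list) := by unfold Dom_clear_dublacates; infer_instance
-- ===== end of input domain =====

-- B replaces A's quadratic in-place merge + quadratic dedup by one dict-grouping pass with
-- precomputed per-group fill values and a seen-set dedup (A mutates its argument's rows in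
-- place; B does not — the equivalence proved here is about the return value).

-- ===== PORT A =====
-- i[k] for a literal non-negative k: exact wherever Python does not raise (Pre_ excludes raises)
def pvFieldA (r : List String) (k : Nat) : String := r.getD k ""

-- one statement "if i[k] == '': i[k] = j[k]" of A's merge branch
def pvSetIf (x j : List String) (k : Nat) : List String :=
  if pvFieldA x k = "" then x.set k (pvFieldA j k) else x

-- the body of A's merge branch: the five sequential 'if i[k] == '': i[k] = j[k]' statements
def pvFillA (i j : List String) : List String :=
  pvSetIf (pvSetIf (pvSetIf (pvSetIf (pvSetIf i j 2) j 3) j 4) j 5) j 6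

-- one inner-loop iteration: i, j read from the current state, i updated in place
def pvStepA (L : List (List String)) (ii jj : Nat) : List (List String) :=
  let i := L.getD ii []
  let j := L.getD jj []
  if pvFieldA i 0 = pvFieldA j 0 ∧ pvFieldA i 1 = pvFieldA j 1 ∧ i ≠ j then
    L.set ii (pvFillA i j)
  else L

def clear_dublacates (contacts_list : List (List String)) : List (List String) :=
  let merged := (List.range contacts_list.length).foldl
      (fun L ii => (List.range L.length).foldl (fun L' jj => pvStepA L' ii jj) L) contacts_list
  merged.foldl (fun acc line => if line ∈ acc then acc else acc ++ [line]) []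

-- ===== PORT B =====
-- (row[0], row[1])
def pvKeyB (r : List String) : String × String :=
  (PySem.List.pyGetD r 0 "", PySem.List.pyGetD r 1 "")

-- groups.setdefault((row[0], row[1]), []).append(row)
def pvGroupsB (L : List (List String)) : PySem.Dict (String × String) (List (List String)) :=
  L.foldl (fun d row => d.modify (pvKeyB row) [] (· ++ [row])) PySem.Dict.empty

-- [next((r[k] for r in rows if r[k] != ''), '') for k in range(2, 7)]
def pvFillOfB (rows : List (List String)) : List String :=
  (PySem.List.pyRange 2 7 1).map (fun k =>
    ((rows.map (fun r => PySem.List.pyGetD r k "")).find? (fun s => s != "")).getD "")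

-- fills[key] = … for groups that contain two differing rows
def pvFillsB (L : List (List String)) : PySem.Dict (String × String) (List String) :=
  (pvGroupsB L).items.foldl
    (fun f kr =>
      if kr.2.any (fun r => r != PySem.List.pyGetD kr.2 0 []) then
        f.insert kr.1 (pvFillOfB kr.2)
      else f)
    PySem.Dict.empty

-- merged = list(row)  |  row[:2] + [row[k] if row[k] != '' else f[k-2] for k in range(2,7)] + row[7:]
def pvMergedB (fills : PySem.Dict (String × String) (List String)) (row : List String) :
    List String :=
  match fills.get? (pvKeyB row) with
  | none => row
  | some f =>
      PySem.List.slice row none (some 2)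
        ++ (PySem.List.pyRange 2 7 1).map (fun k =>
              if PySem.List.pyGetD row k "" != "" then PySem.List.pyGetD row k ""
              else PySem.List.pyGetD f (k - 2) "")
        ++ PySem.List.slice row (some 7) none

def clear_dublacates_alt (contacts_list : List (List String)) : List (List String) :=
  let fills := pvFillsB contacts_list
  (contacts_list.foldl
    (fun (st : PySem.Set (List String) × List (List String)) row =>
      let merged := pvMergedB fills row
      if PySem.Set.contains st.1 merged then st
      else (PySem.Set.add st.1 merged, st.2 ++ [merged]))
    (PySem.Set.empty, [])).2

-- ===== PRECONDITION & SPEC =====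
def pvKeyA (r : List String) : String × String := (r.getD 0 "", r.getD 1 "")

-- Exactly the inputs on which A returns (no IndexError): every row has the two key fields,
-- and any two same-key rows that differ have the full 7 merge fields A's branch indexes.
def Pre_clear_dublacates (contacts_list : List (List String)) : Prop :=
  (∀ r ∈ contacts_list, 2 ≤ r.length) ∧
  ∀ r ∈ contacts_list, ∀ s ∈ contacts_list, pvKeyA r = pvKeyA s → r ≠ s → 7 ≤ r.length

instance (contacts_list : List (List String)) : Decidable (Pre_clear_dublacates contacts_list) := by
  unfold Pre_clear_dublacates; infer_instance

def pvWitness_clear_dublacates : List (List String) :=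
  [["a", "b", "", "d", "e", "f", "g"], ["a", "b", "c", "", "", "", "x"], ["c", "d"]]

def Spec_clear_dublacates (contacts_list : List (List String)) (out : List (List String)) : Prop :=
  out = clear_dublacates_alt contacts_list
instance (contacts_list : List (List String)) (out : List (List String)) :
    Decidable (Spec_clear_dublacates contacts_list out) := by
  unfold Spec_clear_dublacates; infer_instance

-- ===== CLAIM (what is proved, stated in full; the proofs are below) =====
def Claim_equal_clear_dublacates : Prop :=
  ∀ (contacts_list : List (List String)), Dom_clear_dublacates contacts_list →
    Pre_clear_dublacates contacts_list →
    Spec_clear_dublacates contacts_list (clear_dublacates contacts_list)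

-- ===== LEMMAS AND PROOFS =====

-- the group of key κ, the first non-empty value, the per-field fill, heterogeneity of a group
def pvG (L : List (List String)) (κ : String × String) : List (List String) :=
  L.filter (fun r => pvKeyA r == κ)
def pvFNE (xs : List String) : String := (xs.find? (fun s => s != "")).getD ""
def pvF (L : List (List String)) (κ : String × String) (k : Nat) : String :=
  pvFNE ((pvG L κ).map (fun r => pvFieldA r k))
def pvHet (L : List (List String)) (κ : String × String) : Bool :=
  (pvG L κ).any (fun r => r != (pvG L κ).getD 0 [])
def pvMF (L : List (List String)) (r : List String) (k : Nat) : String :=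
  if pvFieldA r k ≠ "" then pvFieldA r k else pvF L (pvKeyA r) k
-- the common merged-row specification both programs are proved to compute
def pvMrg (L : List (List String)) (r : List String) : List String :=
  if pvHet L (pvKeyA r) then
    r.take 2 ++ [pvMF L r 2, pvMF L r 3, pvMF L r 4, pvMF L r 5, pvMF L r 6] ++ r.drop 7
  else r

-- ---------- basic field/fill lemmas ----------
lemma pvFieldA_set_ne (r : List String) (m k : Nat) (v : String) (h : m ≠ k) :
    pvFieldA (r.set m v) k = pvFieldA r k := by
  simp [pvFieldA, List.getD_eq_getElem?_getD, List.getElem?_set_ne h]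

lemma length_pvSetIf (x j : List String) (k : Nat) : (pvSetIf x j k).length = x.length := by
  unfold pvSetIf; split <;> simp

lemma length_pvFillA (i j : List String) : (pvFillA i j).length = i.length := by
  simp [pvFillA, length_pvSetIf]

lemma pvFieldA_pvSetIf (x j : List String) (k k' : Nat) (hk : k < x.length) :
    pvFieldA (pvSetIf x j k) k' =
      if k' = k ∧ pvFieldA x k = "" then pvFieldA j k else pvFieldA x k' := by
  unfold pvSetIf
  by_cases he : pvFieldA x k = ""
  · rw [if_pos he]
    by_cases hkk : k' = k
    · subst hkk
      rw [if_pos ⟨rfl, he⟩]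
      simp [pvFieldA, List.getD_eq_getElem?_getD, hk]
    · simp [hkk, pvFieldA, List.getD_eq_getElem?_getD,
        List.getElem?_set_ne (fun h => hkk h.symm)]
  · simp [he]

lemma pvFieldA_pvSetIf_ne (x j : List String) (k k' : Nat) (hkk : k' ≠ k) :
    pvFieldA (pvSetIf x j k) k' = pvFieldA x k' := by
  unfold pvSetIf
  split
  · exact pvFieldA_set_ne x k k' (pvFieldA j k) (fun h => hkk h.symm)
  · rfl

lemma pvFieldA_pvFillA_low (i j : List String) (k : Nat)
    (h2 : k ≠ 2) (h3 : k ≠ 3) (h4 : k ≠ 4) (h5 : k ≠ 5) (h6 : k ≠ 6) :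
    pvFieldA (pvFillA i j) k = pvFieldA i k := by
  unfold pvFillA
  rw [pvFieldA_pvSetIf_ne _ _ _ _ h6, pvFieldA_pvSetIf_ne _ _ _ _ h5,
    pvFieldA_pvSetIf_ne _ _ _ _ h4, pvFieldA_pvSetIf_ne _ _ _ _ h3,
    pvFieldA_pvSetIf_ne _ _ _ _ h2]

lemma pvKeyA_pvFillA (i j : List String) : pvKeyA (pvFillA i j) = pvKeyA i := by
  show (pvFieldA (pvFillA i j) 0, pvFieldA (pvFillA i j) 1) = (pvFieldA i 0, pvFieldA i 1)
  rw [pvFieldA_pvFillA_low i j 0 (by decide) (by decide) (by decide) (by decide) (by decide),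
    pvFieldA_pvFillA_low i j 1 (by decide) (by decide) (by decide) (by decide) (by decide)]

lemma pvFieldA_pvFillA (i j : List String) (h7 : 7 ≤ i.length) (k : Nat) :
    pvFieldA (pvFillA i j) k =
      if 2 ≤ k ∧ k ≤ 6 ∧ pvFieldA i k = "" then pvFieldA j k else pvFieldA i k := by
  by_cases hk : 2 ≤ k ∧ k ≤ 6
  case neg =>
    rw [if_neg (by tauto)]
    exact pvFieldA_pvFillA_low i j k (by omega) (by omega) (by omega) (by omega) (by omega)
  case pos =>
    have l2 := length_pvSetIf i j 2
    have l3 := length_pvSetIf (pvSetIf i j 2) j 3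
    have l4 := length_pvSetIf (pvSetIf (pvSetIf i j 2) j 3) j 4
    have l5 := length_pvSetIf (pvSetIf (pvSetIf (pvSetIf i j 2) j 3) j 4) j 5
    obtain ⟨hk2, hk6⟩ := hk
    unfold pvFillA
    interval_cases k
    · rw [pvFieldA_pvSetIf_ne _ _ 6 2 (by decide), pvFieldA_pvSetIf_ne _ _ 5 2 (by decide),
        pvFieldA_pvSetIf_ne _ _ 4 2 (by decide), pvFieldA_pvSetIf_ne _ _ 3 2 (by decide),
        pvFieldA_pvSetIf i j 2 2 (by omega)]
      simp
    · rw [pvFieldA_pvSetIf_ne _ _ 6 3 (by decide), pvFieldA_pvSetIf_ne _ _ 5 3 (by decide),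
        pvFieldA_pvSetIf_ne _ _ 4 3 (by decide),
        pvFieldA_pvSetIf (pvSetIf i j 2) j 3 3 (by rw [length_pvSetIf]; omega),
        pvFieldA_pvSetIf_ne i j 2 3 (by decide)]
      simp
    · rw [pvFieldA_pvSetIf_ne _ _ 6 4 (by decide), pvFieldA_pvSetIf_ne _ _ 5 4 (by decide),
        pvFieldA_pvSetIf (pvSetIf (pvSetIf i j 2) j 3) j 4 4
          (by rw [length_pvSetIf, length_pvSetIf]; omega),
        pvFieldA_pvSetIf_ne _ j 3 4 (by decide), pvFieldA_pvSetIf_ne i j 2 4 (by decide)]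
      simp
    · rw [pvFieldA_pvSetIf_ne _ _ 6 5 (by decide),
        pvFieldA_pvSetIf (pvSetIf (pvSetIf (pvSetIf i j 2) j 3) j 4) j 5 5
          (by rw [length_pvSetIf, length_pvSetIf, length_pvSetIf]; omega),
        pvFieldA_pvSetIf_ne _ j 4 5 (by decide), pvFieldA_pvSetIf_ne _ j 3 5 (by decide),
        pvFieldA_pvSetIf_ne i j 2 5 (by decide)]
      simp
    · rw [pvFieldA_pvSetIf (pvSetIf (pvSetIf (pvSetIf (pvSetIf i j 2) j 3) j 4) j 5) j 6 6
          (by rw [length_pvSetIf, length_pvSetIf, length_pvSetIf, length_pvSetIf]; omega),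
        pvFieldA_pvSetIf_ne _ j 5 6 (by decide), pvFieldA_pvSetIf_ne _ j 4 6 (by decide),
        pvFieldA_pvSetIf_ne _ j 3 6 (by decide), pvFieldA_pvSetIf_ne i j 2 6 (by decide)]
      simp

lemma pvFillA_self (i : List String) : pvFillA i i = i := by
  have h : ∀ k, pvSetIf i i k = i := by
    intro k
    unfold pvSetIf
    by_cases he : pvFieldA i k = ""
    rw [if_pos he]
    · by_cases hk : k < i.length
      · have hel : i[k] = "" := by
          simpa [pvFieldA, List.getD_eq_getElem?_getD, List.getElem?_eq_getElem hk] using he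
        calc i.set k (pvFieldA i k) = i.set k i[k] := by
              rw [show pvFieldA i k = i[k] from by
                simp [pvFieldA, List.getD_eq_getElem?_getD, List.getElem?_eq_getElem hk]]
          _ = i := List.set_getElem_self hk
      · exact List.set_eq_of_length_le (by omega)
    · rw [if_neg he]
  unfold pvFillA
  rw [h 2, h 3, h 4, h 5, h 6]

lemma set_getD_self (L : List (List String)) (m : Nat) (h : m < L.length) :
    L.set m (L.getD m []) = L := by
  rw [List.getD_eq_getElem?_getD, List.getElem?_eq_getElem h]
  exact List.set_getElem_self h

-- ---------- the evolution of row m during A's inner loop ----------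
def pvV (L : List (List String)) (m : Nat) (v : List String) (jj : Nat) : List String :=
  let j := if jj = m then v else L.getD jj []
  if pvFieldA v 0 = pvFieldA j 0 ∧ pvFieldA v 1 = pvFieldA j 1 ∧ v ≠ j then pvFillA v j else v

def pvGStep (v j : List String) : List String :=
  if pvKeyA j = pvKeyA v then pvFillA v j else v

lemma inner_localize (L : List (List String)) (m : Nat) (hm : m < L.length) :
    ∀ (js : List Nat) (v : List String),
      js.foldl (fun S jj => pvStepA S m jj) (L.set m v) = L.set m (js.foldl (pvV L m) v) := by
  intro js
  induction js with
  | nil => intro v; rfl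
  | cons a js ih =>
      intro v
      have hi : (L.set m v).getD m [] = v := by
        simp [List.getD_eq_getElem?_getD, hm]
      have hj : (L.set m v).getD a [] = if a = m then v else L.getD a [] := by
        by_cases ha : a = m
        · subst ha; simp [List.getD_eq_getElem?_getD, hm]
        · simp [ha, List.getD_eq_getElem?_getD, List.getElem?_set_ne (fun h => ha h.symm)]
      have hstep : pvStepA (L.set m v) m a = L.set m (pvV L m v a) := by
        unfold pvStepA pvV
        dsimp only
        rw [hi, hj]
        by_cases hc : pvFieldA v 0 = pvFieldA (if a = m then v else L.getD a []) 0 ∧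
            pvFieldA v 1 = pvFieldA (if a = m then v else L.getD a []) 1 ∧
            v ≠ (if a = m then v else L.getD a [])
        · rw [if_pos hc, if_pos hc, List.set_set]
        · rw [if_neg hc, if_neg hc]
      simp only [List.foldl_cons, hstep, ih]

lemma pvV_eq_gstep (L : List (List String)) (m : Nat) (v : List String) (jj : Nat) :
    pvV L m v jj = pvGStep v (if jj = m then v else L.getD jj []) := by
  have main : ∀ j : List String,
      (if pvFieldA v 0 = pvFieldA j 0 ∧ pvFieldA v 1 = pvFieldA j 1 ∧ v ≠ j then pvFillA v j
        else v) = pvGStep v j := by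
    intro j
    unfold pvGStep
    by_cases hvj : v = j
    · subst hvj
      simp [pvFillA_self]
    · have hiff : (pvFieldA v 0 = pvFieldA j 0 ∧ pvFieldA v 1 = pvFieldA j 1 ∧ v ≠ j) ↔
          pvKeyA j = pvKeyA v := by
        constructor
        · rintro ⟨h0, h1, -⟩
          show (pvFieldA j 0, pvFieldA j 1) = (pvFieldA v 0, pvFieldA v 1)
          rw [h0, h1]
        · intro h
          have h' : (pvFieldA j 0, pvFieldA j 1) = (pvFieldA v 0, pvFieldA v 1) := h
          simp only [Prod.mk.injEq] at h'
          exact ⟨h'.1.symm, h'.2.symm, hvj⟩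
      by_cases hc : pvKeyA j = pvKeyA v
      · rw [if_pos (hiff.mpr hc), if_pos hc]
      · rw [if_neg (fun h => hc (hiff.mp h)), if_neg hc]
  unfold pvV
  exact main _

lemma pvGStep_self (v : List String) : pvGStep v v = v := by
  simp [pvGStep, pvFillA_self]

lemma foldl_pvV_eq_gfold (L : List (List String)) (m : Nat) :
    ∀ (js : List Nat) (v : List String), m ∉ js →
      js.foldl (pvV L m) v = (js.map (fun jj => L.getD jj [])).foldl pvGStep v := by
  intro js
  induction js with
  | nil => intro v _; rfl
  | cons a js ih =>
      intro v hm
      simp only [List.mem_cons, not_or] at hm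
      simp only [List.foldl_cons, List.map_cons, pvV_eq_gstep]
      rw [if_neg (fun h => hm.1 h.symm)]
      exact ih _ hm.2

-- ---------- per-field description of the gstep fold ----------
lemma pvFNE_cons (x : String) (xs : List String) :
    pvFNE (x :: xs) = if x = "" then pvFNE xs else x := by
  unfold pvFNE
  rw [List.find?_cons]
  by_cases hx : x = ""
  · simp [hx]
  · have hb : (x != "") = true := by simpa using hx
    simp [hb, hx]

lemma pvFNE_all_empty (xs : List String) (h : ∀ x ∈ xs, x = "") : pvFNE xs = "" := by
  unfold pvFNE
  rw [List.find?_eq_none.mpr (fun x hx => by simp [h x hx])]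
  rfl

lemma eq_empty_of_pvFNE_empty (xs : List String) (h : pvFNE xs = "") : ∀ x ∈ xs, x = "" := by
  intro x hx
  by_contra hne
  unfold pvFNE at h
  cases hf : xs.find? (fun s => s != "") with
  | none =>
      have := List.find?_eq_none.mp hf x hx
      simp at this
      exact hne this
  | some v =>
      have hv := List.find?_some hf
      rw [hf] at h
      simp at h
      rw [h] at hv
      simp at hv

lemma gfold_length (rows : List (List String)) :
    ∀ v, (rows.foldl pvGStep v).length = v.length := by
  induction rows with
  | nil => intro v; rfl
  | cons j rows ih =>
      intro v
      simp only [List.foldl_cons, ih]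
      unfold pvGStep; split <;> simp [length_pvFillA]

lemma gfold_field (κ : String × String) (rows : List (List String)) :
    ∀ v, 7 ≤ v.length → pvKeyA v = κ → ∀ k,
      pvFieldA (rows.foldl pvGStep v) k =
        if 2 ≤ k ∧ k ≤ 6 ∧ pvFieldA v k = "" then
          pvFNE ((rows.filter (fun j => pvKeyA j == κ)).map (fun j => pvFieldA j k))
        else pvFieldA v k := by
  induction rows with
  | nil =>
      intro v _ _ k
      simp only [List.foldl_nil, List.filter_nil, List.map_nil]
      by_cases h : 2 ≤ k ∧ k ≤ 6 ∧ pvFieldA v k = ""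
      · rw [if_pos h, h.2.2]; rfl
      · rw [if_neg h]
  | cons j rows ih =>
      intro v h7 hk k
      simp only [List.foldl_cons, List.filter_cons]
      by_cases hkey : pvKeyA j = pvKeyA v
      · rw [show pvGStep v j = pvFillA v j from if_pos hkey]
        rw [ih (pvFillA v j) (by rw [length_pvFillA]; exact h7)
          (by rw [pvKeyA_pvFillA]; exact hk) k]
        have hfield := pvFieldA_pvFillA v j h7 k
        have hpred : (pvKeyA j == κ) = true := by rw [← hk]; exact beq_iff_eq.mpr hkey
        rw [hpred]
        simp only [if_true, List.map_cons]
        rw [pvFNE_cons]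
        by_cases h26 : 2 ≤ k ∧ k ≤ 6
        · by_cases hv : pvFieldA v k = ""
          · have cv : 2 ≤ k ∧ k ≤ 6 ∧ pvFieldA v k = "" := ⟨h26.1, h26.2, hv⟩
            rw [show pvFieldA (pvFillA v j) k = pvFieldA j k from by
              rw [hfield, if_pos cv]]
            rw [if_pos cv]
            by_cases hj : pvFieldA j k = ""
            · have cj : 2 ≤ k ∧ k ≤ 6 ∧ pvFieldA j k = "" := ⟨h26.1, h26.2, hj⟩
              rw [if_pos cj, if_pos hj]
            · have ncj : ¬(2 ≤ k ∧ k ≤ 6 ∧ pvFieldA j k = "") := fun hcon => hj hcon.2.2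
              rw [if_neg ncj, if_neg hj]
          · have ncv : ¬(2 ≤ k ∧ k ≤ 6 ∧ pvFieldA v k = "") := fun hcon => hv hcon.2.2
            rw [show pvFieldA (pvFillA v j) k = pvFieldA v k from by
              rw [hfield, if_neg ncv]]
            rw [if_neg ncv, if_neg ncv]
        · have ncv : ¬(2 ≤ k ∧ k ≤ 6 ∧ pvFieldA v k = "") := fun hcon => h26 ⟨hcon.1, hcon.2.1⟩
          rw [show pvFieldA (pvFillA v j) k = pvFieldA v k from by
            rw [hfield, if_neg ncv]]
          rw [if_neg ncv, if_neg ncv]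
      · rw [show pvGStep v j = v from if_neg hkey]
        have hpred : (pvKeyA j == κ) = false := by
          rw [← hk]; exact beq_eq_false_iff_ne.mpr hkey
        rw [hpred]
        simp only [Bool.false_eq_true, if_false]
        exact ih v h7 hk k

lemma gfold_const (κ : String × String) (i₀ : List String) (hk : pvKeyA i₀ = κ) :
    ∀ (rows : List (List String)), (∀ c ∈ rows, pvKeyA c = κ → c = i₀) →
      rows.foldl pvGStep i₀ = i₀ := by
  intro rows
  induction rows with
  | nil => intro _; rfl
  | cons j rows ih =>
      intro h
      simp only [List.foldl_cons]
      have hstep : pvGStep i₀ j = i₀ := by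
        unfold pvGStep
        by_cases hkey : pvKeyA j = pvKeyA i₀
        · rw [if_pos hkey, h j (by simp) (by rw [hkey, hk]), pvFillA_self]
        · rw [if_neg hkey]
      rw [hstep]
      exact ih (fun c hc => h c (by simp [hc]))

-- ---------- group facts ----------
lemma mem_pvG (L : List (List String)) (κ : String × String) (r : List String) :
    r ∈ pvG L κ ↔ r ∈ L ∧ pvKeyA r = κ := by
  simp [pvG]

lemma pvHet_exists_partner (L : List (List String)) (κ : String × String)
    (h : pvHet L κ = true) : ∀ t ∈ pvG L κ, ∃ u ∈ pvG L κ, u ≠ t := by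
  unfold pvHet at h
  rw [List.any_eq_true] at h
  obtain ⟨r, hrG, hrne⟩ := h
  have hne : r ≠ (pvG L κ).getD 0 [] := by simpa using hrne
  intro t ht
  have hhead : (pvG L κ).getD 0 [] ∈ pvG L κ := by
    cases hG : pvG L κ with
    | nil => rw [hG] at hrG; cases hrG
    | cons a as => simp
  by_cases hteq : t = (pvG L κ).getD 0 []
  · exact ⟨r, hrG, by rw [hteq]; exact hne⟩
  · exact ⟨(pvG L κ).getD 0 [], hhead, fun he => hteq he.symm⟩

lemma not_pvHet_all_eq (L : List (List String)) (κ : String × String)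
    (h : ¬ pvHet L κ = true) : ∀ r ∈ pvG L κ, ∀ s ∈ pvG L κ, r = s := by
  have hall : ∀ r ∈ pvG L κ, r = (pvG L κ).getD 0 [] := by
    intro r hr
    by_contra hne
    exact h (by unfold pvHet; rw [List.any_eq_true]; exact ⟨r, hr, by simpa using hne⟩)
  intro r hr s hs
  rw [hall r hr, hall s hs]

lemma het_length (L : List (List String)) (hpre : Pre_clear_dublacates L)
    (κ : String × String) (h : pvHet L κ = true) : ∀ t ∈ pvG L κ, 7 ≤ t.length := by
  intro t ht
  obtain ⟨u, hu, hne⟩ := pvHet_exists_partner L κ h t ht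
  rw [mem_pvG] at ht hu
  exact hpre.2 t ht.1 u hu.1 (ht.2.trans hu.2.symm) (fun he => hne (he ▸ rfl))

-- ---------- the merged-row specification ----------
lemma length_pvMrg (L : List (List String)) (r : List String) (h7 : 7 ≤ r.length) :
    (pvMrg L r).length = r.length := by
  unfold pvMrg
  split
  · simp; omega
  · rfl

lemma pvFieldA_mid (r : List String) (a b c d e : String) (h7 : 7 ≤ r.length) (k : Nat) :
    pvFieldA (r.take 2 ++ [a, b, c, d, e] ++ r.drop 7) k =
      if k = 2 then a else if k = 3 then b else if k = 4 then c else if k = 5 then d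
      else if k = 6 then e else pvFieldA r k := by
  have hl : (r.take 2).length = 2 := by simp; omega
  rcases Nat.lt_or_ge k 7 with h7k | h7k
  · interval_cases k <;>
      simp [pvFieldA, List.getD_eq_getElem?_getD, List.getElem?_append, hl,
        show 0 < r.length by omega, show 1 < r.length by omega]
  · rw [if_neg (by omega), if_neg (by omega), if_neg (by omega), if_neg (by omega),
      if_neg (by omega)]
    unfold pvFieldA
    rw [List.getD_eq_getElem?_getD, List.getD_eq_getElem?_getD, List.append_assoc,
      List.getElem?_append_right (by omega),
      List.getElem?_append_right (by simp [hl]; omega), List.getElem?_drop]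
    congr 2
    simp [hl]
    omega

lemma pvKeyA_pvMrg (L : List (List String)) (r : List String)
    (h : pvHet L (pvKeyA r) = true → 7 ≤ r.length) : pvKeyA (pvMrg L r) = pvKeyA r := by
  unfold pvMrg
  by_cases hh : pvHet L (pvKeyA r)
  · rw [if_pos hh]
    have h7 := h hh
    have hl : (List.take 2 r).length = 2 := by simp; omega
    simp [pvKeyA, List.getD_eq_getElem?_getD, List.getElem?_append, hl,
      show 0 < r.length by omega, show 1 < r.length by omega]
  · rw [if_neg hh]

lemma pvFieldA_pvMrg (L : List (List String)) (r : List String) (h7 : 7 ≤ r.length)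
    (hh : pvHet L (pvKeyA r) = true) (k : Nat) (h2 : 2 ≤ k) (h6 : k ≤ 6) :
    pvFieldA (pvMrg L r) k = pvMF L r k := by
  unfold pvMrg
  rw [if_pos hh, pvFieldA_mid r _ _ _ _ _ h7 k]
  interval_cases k <;> simp

lemma pvMrg_of_not_het (L : List (List String)) (r : List String)
    (hh : ¬ pvHet L (pvKeyA r) = true) : pvMrg L r = r := by
  unfold pvMrg; rw [if_neg hh]

-- ---------- the crux: candidate first-non-empty equals the group fill ----------
lemma listEqOfGetD (x y : List String) (hl : x.length = y.length)
    (h : ∀ k, x.getD k "" = y.getD k "") : x = y := by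
  apply List.ext_getElem hl
  intro n h1 h2
  have hn := h n
  rw [List.getD_eq_getElem?_getD, List.getD_eq_getElem?_getD, List.getElem?_eq_getElem h1,
    List.getElem?_eq_getElem h2] at hn
  simpa using hn

lemma pvG_split (L₀ : List (List String)) (m : Nat) (hm : m < L₀.length)
    (κ : String × String) (hk : pvKeyA L₀[m] = κ) :
    pvG L₀ κ = (L₀.take m).filter (fun r => pvKeyA r == κ) ++ L₀[m] ::
      (L₀.drop (m+1)).filter (fun r => pvKeyA r == κ) := by
  unfold pvG
  conv_lhs => rw [← List.take_append_drop m L₀, List.drop_eq_getElem_cons hm]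
  rw [List.filter_append, List.filter_cons, show (pvKeyA L₀[m] == κ) = true from
    beq_iff_eq.mpr hk]
  simp

lemma crux (L₀ : List (List String)) (hpre : Pre_clear_dublacates L₀) (m : Nat)
    (hm : m < L₀.length) (κ : String × String) (hk : pvKeyA L₀[m] = κ)
    (hhet : pvHet L₀ κ = true) (k : Nat) (h2 : 2 ≤ k) (h6 : k ≤ 6)
    (hemp : pvFieldA L₀[m] k = "") :
    pvFNE ((((L₀.take m).map (pvMrg L₀) ++ L₀.drop (m+1)).filter
        (fun j => pvKeyA j == κ)).map (fun j => pvFieldA j k)) = pvF L₀ κ k := by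
  have hkeymrg : ∀ r ∈ L₀, pvKeyA (pvMrg L₀ r) = pvKeyA r := by
    intro r hr
    exact pvKeyA_pvMrg L₀ r
      (fun hh => het_length L₀ hpre _ hh r ((mem_pvG L₀ _ r).mpr ⟨hr, rfl⟩))
  have hfilter : ((L₀.take m).map (pvMrg L₀)).filter (fun j => pvKeyA j == κ) =
      ((L₀.take m).filter (fun r => pvKeyA r == κ)).map (pvMrg L₀) := by
    rw [List.filter_map]
    congr 1
    apply List.filter_congr
    intro r hr
    simp only [Function.comp]
    rw [hkeymrg r (List.take_subset m L₀ hr)]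
  rw [List.filter_append, hfilter, List.map_append, List.map_map]
  set P := (L₀.take m).filter (fun r => pvKeyA r == κ) with hP
  set S := (L₀.drop (m+1)).filter (fun r => pvKeyA r == κ) with hS
  have hFdef : pvF L₀ κ k =
      pvFNE (P.map (fun r => pvFieldA r k) ++ "" :: S.map (fun r => pvFieldA r k)) := by
    unfold pvF
    rw [pvG_split L₀ m hm κ hk, List.map_append, List.map_cons, hemp]
  have hmem_P : ∀ q ∈ P, q ∈ pvG L₀ κ := by
    intro q hq
    have := List.mem_filter.mp hq
    exact (mem_pvG L₀ κ q).mpr ⟨List.take_subset m L₀ this.1, beq_iff_eq.mp this.2⟩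
  have hmem_S : ∀ q ∈ S, q ∈ pvG L₀ κ := by
    intro q hq
    have := List.mem_filter.mp hq
    exact (mem_pvG L₀ κ q).mpr ⟨List.drop_subset (m+1) L₀ this.1, beq_iff_eq.mp this.2⟩
  have hmrgfld : ∀ q ∈ P, pvFieldA (pvMrg L₀ q) k =
      if pvFieldA q k ≠ "" then pvFieldA q k else pvF L₀ κ k := by
    intro q hq
    have hqG := hmem_P q hq
    have hqκ : pvKeyA q = κ := ((mem_pvG L₀ κ q).mp hqG).2
    have h7q : 7 ≤ q.length := het_length L₀ hpre κ hhet q hqG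
    rw [pvFieldA_pvMrg L₀ q h7q (by rw [hqκ]; exact hhet) k h2 h6]
    unfold pvMF
    rw [hqκ]
  rw [hFdef]
  cases hPc : P with
  | nil =>
      simp only [List.map_nil, List.nil_append]
      rw [pvFNE_cons, if_pos rfl]
  | cons p P' =>
      have hpP : p ∈ P := by rw [hPc]; exact List.mem_cons_self
      have hpf := hmrgfld p hpP
      simp only [List.map_cons, List.cons_append]
      rw [pvFNE_cons, pvFNE_cons]
      simp only [Function.comp_apply]
      by_cases hpe : pvFieldA p k = ""
      · rw [if_pos hpe]
        have hFr : pvF L₀ κ k =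
            pvFNE (P'.map (fun r => pvFieldA r k) ++ "" :: S.map (fun r => pvFieldA r k)) := by
          rw [hFdef, hPc]
          simp only [List.map_cons, List.cons_append]
          rw [pvFNE_cons, if_pos hpe]
        rw [show pvFieldA (pvMrg L₀ p) k = pvF L₀ κ k from by
          rw [hpf, if_neg (not_not_intro hpe)]]
        by_cases hF : pvF L₀ κ k = ""
        · rw [if_pos hF, ← hFr, hF]
          have hall : ∀ x ∈ (pvG L₀ κ).map (fun r => pvFieldA r k), x = "" :=
            eq_empty_of_pvFNE_empty _ (by unfold pvF at hF; exact hF)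
          apply pvFNE_all_empty
          intro x hx
          rcases List.mem_append.mp hx with hx1 | hx2
          · obtain ⟨q, hq, rfl⟩ := List.mem_map.mp hx1
            have hqP : q ∈ P := by rw [hPc]; exact List.mem_cons_of_mem _ hq
            have hqe : pvFieldA q k = "" :=
              hall _ (List.mem_map.mpr ⟨q, hmem_P q hqP, rfl⟩)
            simp only [Function.comp_apply]
            rw [hmrgfld q hqP, if_neg (not_not_intro hqe)]
            exact hF
          · obtain ⟨q, hq, rfl⟩ := List.mem_map.mp hx2
            exact hall _ (List.mem_map.mpr ⟨q, hmem_S q hq, rfl⟩)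
        · rw [if_neg hF, hFr]
      · rw [if_neg hpe]
        rw [show pvFieldA (pvMrg L₀ p) k = pvFieldA p k from by rw [hpf, if_pos hpe]]
        rw [if_neg hpe]

-- ---------- the inner pass computes the merged row ----------
lemma range_getD_map (X : List (List String)) :
    ∀ (len a : Nat), a + len ≤ X.length →
      (List.range' a len).map (fun i => X.getD i []) = (X.drop a).take len := by
  intro len
  induction len with
  | zero => intro a _; simp
  | succ n ihn =>
      intro a h
      have ha : a < X.length := by omega
      rw [List.range'_succ, List.map_cons, List.drop_eq_getElem_cons ha, List.take_succ_cons]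
      congr 1
      · simp [List.getD_eq_getElem?_getD, List.getElem?_eq_getElem ha]
      · exact ihn (a + 1) (by omega)

lemma inner_pass (L₀ : List (List String)) (hpre : Pre_clear_dublacates L₀) (m : Nat)
    (hm : m < L₀.length) :
    (List.range L₀.length).foldl
        (pvV ((L₀.map (pvMrg L₀)).take m ++ L₀.drop m) m) L₀[m] = pvMrg L₀ L₀[m] := by
  have hkeymrg : ∀ r ∈ L₀, pvKeyA (pvMrg L₀ r) = pvKeyA r := by
    intro r hr
    exact pvKeyA_pvMrg L₀ r
      (fun hh => het_length L₀ hpre _ hh r ((mem_pvG L₀ _ r).mpr ⟨hr, rfl⟩))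
  set M := L₀.map (pvMrg L₀) with hM
  set X := M.take m ++ L₀.drop m with hX
  have hMlen : M.length = L₀.length := by simp [hM]
  have htakelen : (M.take m).length = m := by simp [hMlen]; omega
  have hXlen : X.length = L₀.length := by simp [hX, hMlen]; omega
  have hXtake : X.take m = M.take m := by
    have h := List.take_left (l₂ := L₀.drop m) (l₁ := M.take m)
    rw [htakelen] at h
    exact h
  have hXdrop : X.drop (m+1) = L₀.drop (m+1) := by
    have h := List.drop_length_add_append (l₁ := M.take m) (l₂ := L₀.drop m) 1
    rw [htakelen, List.drop_drop] at h
    simpa [Nat.add_comm] using h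
  have hrange : List.range L₀.length =
      List.range' 0 m ++ m :: List.range' (m+1) (L₀.length - (m+1)) := by
    rw [List.range_eq_range',
      show L₀.length = m + (L₀.length - m) from by omega, ← List.range'_append_1,
      show L₀.length - m = (L₀.length - (m+1)) + 1 from by omega, List.range'_succ,
      Nat.zero_add]
    have harith : m + (L₀.length - (m + 1) + 1) - (m + 1) = L₀.length - (m + 1) := by omega
    rw [harith]
  have hnm1 : m ∉ List.range' 0 m := by
    intro h; rw [List.mem_range'_1] at h; omega
  have hnm2 : m ∉ List.range' (m+1) (L₀.length - (m+1)) := by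
    intro h; rw [List.mem_range'_1] at h; omega
  rw [hrange, List.foldl_append, List.foldl_cons,
    foldl_pvV_eq_gfold X m (List.range' 0 m) L₀[m] hnm1,
    range_getD_map X m 0 (by omega), List.drop_zero, hXtake,
    pvV_eq_gstep, if_pos rfl, pvGStep_self,
    foldl_pvV_eq_gfold X m (List.range' (m+1) (L₀.length - (m+1))) _ hnm2,
    range_getD_map X (L₀.length - (m+1)) (m+1) (by omega), hXdrop,
    List.take_of_length_le (l := L₀.drop (m+1)) (i := L₀.length - (m+1)) (by simp),
    ← List.foldl_append]
  -- now: (M.take m ++ L₀.drop (m+1)).foldl pvGStep L₀[m] = pvMrg L₀ L₀[m]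
  have hMtake : M.take m = (L₀.take m).map (pvMrg L₀) := by rw [hM, List.map_take]
  have hiG : L₀[m] ∈ pvG L₀ (pvKeyA L₀[m]) :=
    (mem_pvG L₀ _ _).mpr ⟨List.getElem_mem hm, rfl⟩
  by_cases hhet : pvHet L₀ (pvKeyA L₀[m]) = true
  · have h7 : 7 ≤ L₀[m].length := het_length L₀ hpre _ hhet _ hiG
    apply listEqOfGetD
    · rw [gfold_length, length_pvMrg L₀ _ h7]
    · intro k
      show pvFieldA _ k = pvFieldA _ k
      rw [gfold_field (pvKeyA L₀[m]) _ _ h7 rfl k]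
      by_cases hc : 2 ≤ k ∧ k ≤ 6 ∧ pvFieldA L₀[m] k = ""
      · rw [if_pos hc, hMtake,
          crux L₀ hpre m hm (pvKeyA L₀[m]) rfl hhet k hc.1 hc.2.1 hc.2.2,
          pvFieldA_pvMrg L₀ _ h7 hhet k hc.1 hc.2.1]
        unfold pvMF
        rw [if_neg (not_not_intro hc.2.2)]
      · rw [if_neg hc]
        by_cases h26 : 2 ≤ k ∧ k ≤ 6
        · have hne : pvFieldA L₀[m] k ≠ "" := fun h => hc ⟨h26.1, h26.2, h⟩
          rw [pvFieldA_pvMrg L₀ _ h7 hhet k h26.1 h26.2]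
          unfold pvMF
          rw [if_pos hne]
        · unfold pvMrg
          rw [if_pos hhet, pvFieldA_mid _ _ _ _ _ _ h7 k, if_neg (by omega), if_neg (by omega),
            if_neg (by omega), if_neg (by omega), if_neg (by omega)]
  · rw [pvMrg_of_not_het L₀ _ hhet]
    apply gfold_const (pvKeyA L₀[m]) _ rfl
    intro c hc hkc
    rcases List.mem_append.mp hc with hcM | hcS
    · rw [hMtake] at hcM
      obtain ⟨s, hs, rfl⟩ := List.mem_map.mp hcM
      have hsL : s ∈ L₀ := List.take_subset m L₀ hs
      have hkey_s : pvKeyA s = pvKeyA L₀[m] := by rw [← hkc, hkeymrg s hsL]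
      have hsi : s = L₀[m] := not_pvHet_all_eq L₀ _ hhet s
        ((mem_pvG L₀ _ s).mpr ⟨hsL, hkey_s⟩) _ hiG
      rw [pvMrg_of_not_het L₀ s (by rw [hkey_s]; exact hhet), hsi]
    · exact not_pvHet_all_eq L₀ _ hhet c
        ((mem_pvG L₀ _ c).mpr ⟨List.drop_subset (m+1) L₀ hcS, hkc⟩) _ hiG

-- ---------- the outer loop ----------
lemma set_append_len (xs ys : List (List String)) (y v : List String) (n : Nat)
    (h : n = xs.length) : (xs ++ y :: ys).set n v = xs ++ v :: ys := by
  subst h; simp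

lemma outer_loop (L₀ : List (List String)) (hpre : Pre_clear_dublacates L₀) :
    ∀ m ≤ L₀.length,
      (List.range m).foldl
          (fun L ii => (List.range L.length).foldl (fun L' jj => pvStepA L' ii jj) L) L₀ =
        (L₀.map (pvMrg L₀)).take m ++ L₀.drop m := by
  intro m
  induction m with
  | zero => intro _; simp
  | succ m ihm =>
      intro hm1
      have hm : m < L₀.length := by omega
      have hMlen : (L₀.map (pvMrg L₀)).length = L₀.length := by simp
      have htakelen : ((L₀.map (pvMrg L₀)).take m).length = m := by simp; omega
      have hXlen : ((L₀.map (pvMrg L₀)).take m ++ L₀.drop m).length = L₀.length := by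
        simp; omega
      have hXm : ((L₀.map (pvMrg L₀)).take m ++ L₀.drop m).getD m [] = L₀[m] := by
        rw [List.getD_eq_getElem?_getD,
          List.getElem?_append_right (by rw [htakelen]),
          List.drop_eq_getElem_cons hm, htakelen, Nat.sub_self]
        rfl
      rw [List.range_succ, List.foldl_append, ihm (by omega), List.foldl_cons, List.foldl_nil,
        hXlen]
      conv_lhs => rw [show (L₀.map (pvMrg L₀)).take m ++ L₀.drop m =
        ((L₀.map (pvMrg L₀)).take m ++ L₀.drop m).set m
          (((L₀.map (pvMrg L₀)).take m ++ L₀.drop m).getD m []) from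
        (set_getD_self _ m (by rw [hXlen]; omega)).symm]
      rw [inner_localize _ m (by rw [hXlen]; omega) (List.range L₀.length) _, hXm,
        inner_pass L₀ hpre m hm]
      conv_lhs => rw [show L₀.drop m = L₀[m] :: L₀.drop (m+1) from
        List.drop_eq_getElem_cons hm]
      rw [set_append_len _ _ _ _ m htakelen.symm,
        List.take_succ_eq_append_getElem (by rw [hMlen]; omega), List.getElem_map]
      simp

-- ---------- dedup passes ----------
lemma dedupA_eq_ofList (xs : List (List String)) :
    xs.foldl (fun acc line => if line ∈ acc then acc else acc ++ [line]) [] =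
      PySem.Set.ofList xs := by
  have hstep : (fun (acc : List (List String)) line =>
      if line ∈ acc then acc else acc ++ [line]) = PySem.Set.add := by
    funext acc line
    by_cases h : line ∈ acc
    · simp [PySem.Set.add, PySem.Set.contains, h]
    · simp [PySem.Set.add, PySem.Set.contains, h]
  rw [hstep, PySem.Set.ofList_eq_foldl]

lemma dedupB_snd (g : List String → List String) :
    ∀ (l : List (List String)) (s r : List (List String)), s = r →
      (l.foldl
        (fun (st : PySem.Set (List String) × List (List String)) row =>
          if PySem.Set.contains st.1 (g row) then st
          else (PySem.Set.add st.1 (g row), st.2 ++ [g row])) (s, r)).2 =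
      (l.map g).foldl PySem.Set.add r := by
  intro l
  induction l with
  | nil => intro s r h; subst h; rfl
  | cons x l ih =>
      intro s r h
      subst h
      simp only [List.foldl_cons, List.map_cons]
      by_cases hc : PySem.Set.contains s (g x)
      · rw [if_pos hc, show PySem.Set.add s (g x) = s from by
          unfold PySem.Set.add; rw [if_pos hc]]
        exact ih s s rfl
      · rw [if_neg hc, show PySem.Set.add s (g x) = s ++ [g x] from by
          unfold PySem.Set.add; rw [if_neg hc]]
        exact ih (s ++ [g x]) (s ++ [g x]) rfl

-- ---------- B computes the same merged rows ----------
lemma pvKeyB_eq (r : List String) : pvKeyB r = pvKeyA r := by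
  simp [pvKeyB, pvKeyA, pysem]

lemma groupsB_getD (L : List (List String)) (κ : String × String) :
    (pvGroupsB L).getD κ [] = pvG L κ := by
  have hpairs : pvGroupsB L = (L.map (fun r => (pvKeyB r, r))).foldl
      (fun d p => d.modify p.1 [] (· ++ [p.2])) PySem.Dict.empty := by
    unfold pvGroupsB
    rw [List.foldl_map]
  rw [hpairs, PySem.Dict.getD_foldl_modify_append, List.filter_map, List.map_map]
  show PySem.Dict.empty.getD κ [] ++
      (L.filter ((fun p => p.1 == κ) ∘ fun r => (pvKeyB r, r))).map
        (Prod.snd ∘ fun r => (pvKeyB r, r)) = pvG L κ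
  have h1 : ((fun (p : (String × String) × List String) => p.1 == κ) ∘
      fun r => (pvKeyB r, r)) = fun r => pvKeyA r == κ := by
    funext r
    simp [Function.comp, pvKeyB_eq]
  have h2 : (Prod.snd ∘ fun (r : List String) => (pvKeyB r, r)) = id := by
    funext r; rfl
  rw [h1, h2, List.map_id]
  rfl

lemma keysB (L : List (List String)) :
    (pvGroupsB L).keys = PySem.Set.ofList (L.map pvKeyB) := by
  unfold pvGroupsB
  rw [PySem.Dict.keys_foldl_modify_key]
  rw [PySem.Set.ofList_eq_foldl]
  rfl

lemma nodup_keysB (L : List (List String)) : (pvGroupsB L).keys.Nodup := by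
  unfold pvGroupsB
  exact PySem.Dict.nodup_keys_foldl_modify_key L pvKeyB [] (fun d x => (· ++ [x]))
    PySem.Dict.empty (by simp [PySem.Dict.empty])

lemma find?_beq_self (K : List (String × String)) (κ : String × String) (h : κ ∈ K) :
    K.find? (fun x => x == κ) = some κ := by
  induction K with
  | nil => cases h
  | cons a K ih =>
      by_cases ha : (a == κ) = true
      · rw [List.find?_cons_of_pos (p := fun x => x == κ) ha]
        rw [beq_iff_eq.mp ha]
      · rw [List.find?_cons_of_neg (p := fun x => x == κ) (by simpa using ha)]
        rcases List.mem_cons.mp h with he | hm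
        · exact absurd (beq_iff_eq.mpr he.symm) ha
        · exact ih hm

lemma fills_fold_nomem (its : List ((String × String) × List (List String))) :
    ∀ (f : PySem.Dict (String × String) (List String)) (κ : String × String),
      (∀ kr ∈ its, kr.1 ≠ κ) →
      (its.foldl (fun f kr =>
        if kr.2.any (fun r => r != PySem.List.pyGetD kr.2 0 []) then
          f.insert kr.1 (pvFillOfB kr.2)
        else f) f).get? κ = f.get? κ := by
  induction its with
  | nil => intro f κ _; rfl
  | cons kr its ih =>
      intro f κ h
      simp only [List.foldl_cons]
      rw [ih _ κ (fun kr' h' => h kr' (List.mem_cons_of_mem _ h'))]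
      by_cases hg : kr.2.any (fun r => r != PySem.List.pyGetD kr.2 0 []) = true
      · rw [if_pos hg, PySem.Dict.get?_insert_of_ne _ _ (fun he => h kr List.mem_cons_self he.symm)]
      · rw [if_neg hg]

lemma fills_fold_get (its : List ((String × String) × List (List String))) :
    ∀ (f : PySem.Dict (String × String) (List String)) (κ : String × String),
      (its.map Prod.fst).Nodup →
      (its.foldl (fun f kr =>
        if kr.2.any (fun r => r != PySem.List.pyGetD kr.2 0 []) then
          f.insert kr.1 (pvFillOfB kr.2)
        else f) f).get? κ =
      match its.find? (fun kr => kr.1 == κ) with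
      | some kr => if kr.2.any (fun r => r != PySem.List.pyGetD kr.2 0 []) then
          some (pvFillOfB kr.2) else f.get? κ
      | none => f.get? κ := by
  induction its with
  | nil => intro f κ _; rfl
  | cons kr its ih =>
      intro f κ hnd
      rw [List.map_cons] at hnd
      have hnd' := List.nodup_cons.mp hnd
      simp only [List.foldl_cons]
      by_cases hk : (kr.1 == κ) = true
      · have hkeq : kr.1 = κ := beq_iff_eq.mp hk
        rw [List.find?_cons_of_pos (p := fun (q : (String × String) × List (List String)) => q.1 == κ) hk]
        have hnomem : ∀ kr' ∈ its, kr'.1 ≠ κ := by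
          intro kr' h' heq
          exact hnd'.1 (List.mem_map.mpr ⟨kr', h', by rw [heq, ← hkeq]⟩)
        by_cases hg : kr.2.any (fun r => r != PySem.List.pyGetD kr.2 0 []) = true
        · rw [if_pos hg]
          dsimp only
          rw [if_pos hg, fills_fold_nomem its _ κ hnomem,
            show κ = kr.1 from hkeq.symm, PySem.Dict.get?_insert_self]
        · rw [if_neg hg]
          dsimp only
          rw [if_neg hg, fills_fold_nomem its f κ hnomem]
      · rw [List.find?_cons_of_neg (p := fun (q : (String × String) × List (List String)) => q.1 == κ) (by simpa using hk)]
        have hne : κ ≠ kr.1 := fun he => hk (beq_iff_eq.mpr he.symm)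
        have hf' : (if kr.2.any (fun r => r != PySem.List.pyGetD kr.2 0 []) then
            f.insert kr.1 (pvFillOfB kr.2) else f).get? κ = f.get? κ := by
          by_cases hg : kr.2.any (fun r => r != PySem.List.pyGetD kr.2 0 []) = true
          · rw [if_pos hg, PySem.Dict.get?_insert_of_ne _ _ hne]
          · rw [if_neg hg]
        rw [ih _ κ hnd'.2]
        cases hfind : its.find? (fun kr => kr.1 == κ) with
        | none => simpa using hf'
        | some kr' =>
            dsimp only
            rw [hf']

lemma fillsB_get? (L : List (List String)) (κ : String × String) (hκ : κ ∈ L.map pvKeyB) :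
    (pvFillsB L).get? κ =
      if pvHet L κ then some (pvFillOfB (pvG L κ)) else none := by
  unfold pvFillsB
  rw [PySem.Dict.items_eq_map_keys (pvGroupsB L) (nodup_keysB L) []]
  rw [fills_fold_get _ PySem.Dict.empty κ (by
    rw [List.map_map]
    have : (Prod.fst ∘ fun k => (k, (pvGroupsB L).getD k [])) = id := by funext k; rfl
    rw [this, List.map_id]
    exact nodup_keysB L)]
  rw [List.find?_map]
  have hpred : ((fun (kr : (String × String) × List (List String)) => kr.1 == κ) ∘
      fun k => (k, (pvGroupsB L).getD k [])) = fun k => k == κ := by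
    funext k; rfl
  rw [hpred, find?_beq_self _ κ (by
    rw [keysB]
    exact (PySem.Set.mem_ofList _ _).mpr hκ)]
  simp only [Option.map_some]
  rw [groupsB_getD]
  have hguard : ((pvG L κ).any (fun r => r != PySem.List.pyGetD (pvG L κ) 0 [])) =
      pvHet L κ := by
    unfold pvHet
    rw [PySem.List.pyGetD_zero]
  rw [hguard]
  by_cases hh : pvHet L κ = true
  · rw [if_pos hh, if_pos hh]
  · rw [if_neg hh, if_neg hh]
    rfl

lemma fillOfB_eq (L : List (List String)) (κ : String × String) :
    pvFillOfB (pvG L κ) = [pvF L κ 2, pvF L κ 3, pvF L κ 4, pvF L κ 5, pvF L κ 6] := by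
  unfold pvFillOfB
  rw [show PySem.List.pyRange 2 7 1 = [2, 3, 4, 5, 6] from by decide]
  simp only [List.map_cons, List.map_nil, PySem.List.pyGetD_ofNat']
  rfl

lemma mergedB_eq (L : List (List String))
    (row : List String) (hrow : row ∈ L) :
    pvMergedB (pvFillsB L) row = pvMrg L row := by
  unfold pvMergedB
  have hκ : pvKeyB row ∈ L.map pvKeyB := List.mem_map.mpr ⟨row, hrow, rfl⟩
  rw [fillsB_get? L (pvKeyB row) hκ, pvKeyB_eq]
  by_cases hh : pvHet L (pvKeyA row) = true
  · rw [if_pos hh]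
    dsimp only
    rw [fillOfB_eq, show PySem.List.pyRange 2 7 1 = [2, 3, 4, 5, 6] from by decide]
    simp only [List.map_cons, List.map_nil]
    rw [PySem.List.slice_to (xs := row) (b := 2) (by norm_num),
      PySem.List.slice_from (xs := row) (a := 7) (by norm_num)]
    unfold pvMrg
    rw [if_pos hh]
    norm_num
    simp [PySem.List.pyGetD_ofNat', pvMF, pvFieldA]
  · rw [if_neg hh]
    dsimp only
    rw [pvMrg_of_not_het L row hh]

-- ---------- assembly ----------
theorem clear_dublacates_spec : Claim_equal_clear_dublacates := by
  intro L _ hpre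
  unfold Spec_clear_dublacates clear_dublacates clear_dublacates_alt
  dsimp only
  have hA := outer_loop L hpre L.length le_rfl
  rw [show (List.map (pvMrg L) L).take L.length = List.map (pvMrg L) L from
      List.take_of_length_le (by simp), List.drop_length, List.append_nil] at hA
  rw [hA, dedupA_eq_ofList, dedupB_snd (pvMergedB (pvFillsB L)) L PySem.Set.empty [] rfl]
  rw [List.map_congr_left (fun row hrow => mergedB_eq L row hrow)]
  rfl
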